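-- pv_equiv track=rewrite | github.com/anaiskillian/ai_defense | camera/detection_service.py | assess_threat_level
-- ===== SOURCE A (Python) =====
-- def assess_threat_level(objects, location, additional_data):
--     """Assess the threat level based on detected objects and context"""
--     # This would be more sophisticated in a real implementation
--     high_threat_objects = ["submarine", "potential_submarine", "military_vessel", "armed_person"]
--     medium_threat_objects = ["unidentified_vessel", "unauthorized_vessel", "diver"]
--
--     detected_types = [obj["type"] for obj in objects]
--
--     if any(threat in detected_types for threat in high_threat_objects):
--         return "high"
--     elif any(threat in detected_types for threat in medium_threat_objects):
--         return "medium"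
--     elif objects:
--         return "low"
--     else:
--         return "none"
-- ===== SOURCE B (Python) =====
-- def assess_threat_level(objects, location, additional_data):
--     """Assess the threat level based on detected objects and context"""
--     rank = {t: 3 for t in ["submarine", "potential_submarine", "military_vessel", "armed_person"]}
--     rank.update({t: 2 for t in ["unidentified_vessel", "unauthorized_vessel", "diver"]})
--     m = max((rank.get(obj["type"], 1) for obj in objects), default=0)
--     return {3: "high", 2: "medium", 1: "low", 0: "none"}[m]
-- ===== Notes on version B (the rewrite author's own statement) =====
-- stated objective: alternative
-- what changed: Replaces the two priority-ordered any-scans over the threat lists with a single pass computing a running maximum severity rank (dict lookup per object), then maps the max rank back to the level string.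
import Mathlib
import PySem

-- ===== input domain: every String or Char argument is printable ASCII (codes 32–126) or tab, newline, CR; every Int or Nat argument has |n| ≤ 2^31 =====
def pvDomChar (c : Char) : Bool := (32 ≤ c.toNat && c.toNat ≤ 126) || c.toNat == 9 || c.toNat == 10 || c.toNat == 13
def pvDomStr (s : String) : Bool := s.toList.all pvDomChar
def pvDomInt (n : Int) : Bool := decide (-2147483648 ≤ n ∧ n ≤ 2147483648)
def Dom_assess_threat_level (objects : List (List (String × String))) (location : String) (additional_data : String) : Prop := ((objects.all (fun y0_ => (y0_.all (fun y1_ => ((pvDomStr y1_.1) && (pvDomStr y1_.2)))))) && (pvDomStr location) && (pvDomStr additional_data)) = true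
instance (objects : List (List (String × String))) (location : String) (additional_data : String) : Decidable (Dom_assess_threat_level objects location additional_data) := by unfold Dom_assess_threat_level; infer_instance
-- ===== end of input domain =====

-- B replaces A's two priority-ordered any-scans with a single pass taking the maximum severity rank; objective: alternative decomposition (similar cost).

-- ===== PORT A =====
-- obj["type"] : first-match lookup in the association list; none = KeyError, excluded by Pre_ (getD "" never fires under Pre_).
def pvTypeOf (o : List (String × String)) : String :=
  ((o.find? (fun p => p.1 == "type")).map (·.2)).getD ""

def assess_threat_level (objects : List (List (String × String))) (location : String) (additional_data : String) : String :=
  let high_threat_objects := ["submarine", "potential_submarine", "military_vessel", "armed_person"]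
  let medium_threat_objects := ["unidentified_vessel", "unauthorized_vessel", "diver"]
  let detected_types := objects.map pvTypeOf
  if high_threat_objects.any (fun threat => detected_types.contains threat) then "high"
  else if medium_threat_objects.any (fun threat => detected_types.contains threat) then "medium"
  else if !objects.isEmpty then "low"
  else "none"

-- ===== PORT B =====
-- the rank dict: each high-threat type ↦ 3, each medium-threat type ↦ 2 (insertion order; keys distinct)
def pvRankDict : PySem.Dict String Int :=
  PySem.Dict.ofList [("submarine", 3), ("potential_submarine", 3), ("military_vessel", 3), ("armed_person", 3),
                     ("unidentified_vessel", 2), ("unauthorized_vessel", 2), ("diver", 2)]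

def assess_threat_level_alt (objects : List (List (String × String))) (location : String) (additional_data : String) : String :=
  let m := objects.foldl (fun acc obj => max acc (pvRankDict.getD (pvTypeOf obj) 1)) 0
  if m = 3 then "high" else if m = 2 then "medium" else if m = 1 then "low" else "none"

-- ===== PRECONDITION & SPEC =====
-- Pre_ excludes exactly the objects without a "type" key, on which Python A raises KeyError.
def Pre_assess_threat_level (objects : List (List (String × String))) (location : String) (additional_data : String) : Prop :=
  (objects.all (fun o => o.any (fun p => p.1 == "type"))) = true
instance (objects : List (List (String × String))) (location : String) (additional_data : String) : Decidable (Pre_assess_threat_level objects location additional_data) := by unfold Pre_assess_threat_level; infer_instance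

def pvWitness_assess_threat_level : (List (List (String × String))) × String × String :=
  ([[("type", "diver")], [("type", "fish")]], "harbor", "")

def Spec_assess_threat_level (objects : List (List (String × String))) (location : String) (additional_data : String) (out : String) : Prop := out = assess_threat_level_alt objects location additional_data
instance (objects : List (List (String × String))) (location : String) (additional_data : String) (out : String) : Decidable (Spec_assess_threat_level objects location additional_data out) := by unfold Spec_assess_threat_level; infer_instance

-- ===== CLAIM (what is proved, stated in full; the proofs are below) =====
def Claim_equal_assess_threat_level : Prop := ∀ (objects : List (List (String × String))) (location : String) (additional_data : String), Dom_assess_threat_level objects location additional_data → Pre_assess_threat_level objects location additional_data → Spec_assess_threat_level objects location additional_data (assess_threat_level objects location additional_data)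

-- ===== LEMMAS AND PROOFS =====

def pvH : List String := ["submarine", "potential_submarine", "military_vessel", "armed_person"]
def pvM : List String := ["unidentified_vessel", "unauthorized_vessel", "diver"]

-- B's per-object step
def pvRank (o : List (String × String)) : Int := pvRankDict.getD (pvTypeOf o) 1
def pvMaxR (objects : List (List (String × String))) : Int :=
  objects.foldl (fun acc obj => max acc (pvRank obj)) 0

lemma pvRank_eq (o : List (String × String)) :
    pvRank o = (if pvTypeOf o ∈ pvH then 3 else if pvTypeOf o ∈ pvM then 2 else 1) := by
  have hd : pvRankDict = PySem.Dict.mk [("submarine", 3), ("potential_submarine", 3), ("military_vessel", 3), ("armed_person", 3), ("unidentified_vessel", 2), ("unauthorized_vessel", 2), ("diver", 2)] := by rfl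
  simp only [pvRank, hd, PySem.Dict.getD, PySem.Dict.get?_mk_cons, pvH, pvM,
    List.mem_cons, List.not_mem_nil, or_false]
  split_ifs <;> simp_all [PySem.Dict.get?, PySem.Dict.empty] <;> simp_all [eq_comm]

lemma pvRank_bounds (o : List (String × String)) : 1 ≤ pvRank o ∧ pvRank o ≤ 3 := by
  rw [pvRank_eq]; split_ifs <;> omega

lemma pvMaxR_foldl (objects : List (List (String × String))) (a : Int) (ha : 0 ≤ a) :
    objects.foldl (fun acc obj => max acc (pvRank obj)) a
      = max a (objects.foldl (fun acc obj => max acc (pvRank obj)) 0) := by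
  induction objects generalizing a with
  | nil => simp; omega
  | cons o os ih =>
    have hb := pvRank_bounds o
    simp only [List.foldl_cons] at *
    rw [ih _ (by omega), ih (max 0 (pvRank o)) (by omega)]
    omega

lemma pvMaxR_nonneg (objects : List (List (String × String))) :
    0 ≤ objects.foldl (fun acc obj => max acc (pvRank obj)) 0 := by
  cases objects with
  | nil => simp
  | cons o os =>
    have hb := pvRank_bounds o
    simp only [List.foldl_cons]
    rw [pvMaxR_foldl os _ (by omega)]
    omega

lemma pvMaxR_char (objects : List (List (String × String))) :
    pvMaxR objects =
      (if ∃ o ∈ objects, pvTypeOf o ∈ pvH then 3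
       else if ∃ o ∈ objects, pvTypeOf o ∈ pvM then 2
       else if objects = [] then 0 else 1) := by
  induction objects with
  | nil => simp [pvMaxR]
  | cons o os ih =>
    have hb := pvRank_bounds o
    have h1 : pvMaxR (o :: os) = max (pvRank o) (pvMaxR os) := by
      have hnn := pvMaxR_nonneg os
      unfold pvMaxR
      simp only [List.foldl_cons]
      rw [pvMaxR_foldl os _ (by omega)]
      omega
    rw [h1, ih, pvRank_eq]
    by_cases hH : pvTypeOf o ∈ pvH <;> by_cases hM : pvTypeOf o ∈ pvM <;>
      by_cases hH2 : ∃ x ∈ os, pvTypeOf x ∈ pvH <;> by_cases hM2 : ∃ x ∈ os, pvTypeOf x ∈ pvM <;>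
      by_cases hE : os = [] <;>
      simp only [hH, hM, hH2, hM2, hE, List.mem_cons, exists_eq_or_imp, if_true, if_false,
        true_or, or_true, false_or, or_false, eq_self_iff_true, if_pos, if_neg,
        not_false_iff, List.cons_ne_nil] <;>
      first
        | omega
        | (split_ifs <;> omega)
        | (split_ifs <;> simp_all <;> omega)
        | (simp_all <;> omega)
        | simp_all

-- ===== VERDICT (by name: the statement is the Claim_ definition above) =====
theorem assess_threat_level_spec : Claim_equal_assess_threat_level := by
  intro objects location additional_data _ _
  unfold Spec_assess_threat_level assess_threat_level assess_threat_level_alt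
  simp only []
  rw [show objects.foldl (fun acc obj => max acc (pvRankDict.getD (pvTypeOf obj) 1)) 0 = pvMaxR objects from rfl,
    pvMaxR_char]
  have hA : ∀ (L : List String),
      (L.any (fun threat => (objects.map pvTypeOf).contains threat) = true) ↔
      ∃ o ∈ objects, pvTypeOf o ∈ L := by
    intro L
    simp only [List.any_eq_true, List.contains_iff_mem, List.mem_map]
    constructor
    · rintro ⟨t, ht, o, ho, rfl⟩; exact ⟨o, ho, ht⟩
    · rintro ⟨o, ho, ht⟩; exact ⟨pvTypeOf o, ht, o, ho, rfl⟩
  rw [show ["submarine", "potential_submarine", "military_vessel", "armed_person"] = pvH from rfl,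
      show ["unidentified_vessel", "unauthorized_vessel", "diver"] = pvM from rfl]
  by_cases hH : ∃ o ∈ objects, pvTypeOf o ∈ pvH <;>
    by_cases hM : ∃ o ∈ objects, pvTypeOf o ∈ pvM <;>
    by_cases hE : objects = [] <;>
    simp only [hA, hH, hM, hE, if_true, if_false, Bool.not_eq_true', List.isEmpty_iff,
      not_false_iff, iff_true, iff_false] <;>
    norm_num <;> simp_all
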